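-- pv_equiv track=rewrite | github.com/sueszli/vector-database-benchmark | dataset/python-mutated/rst_helpers.py | iterator_for_divmod
-- ===== SOURCE A (Python) =====
-- def iterator_for_divmod(iterable, div: int=3):
--     if False:
--         return 10
--     items = list(iterable)
--     size = len(items)
--     rem = size % div
--     complement = size + div - rem
--     for i in range(complement):
--         if i < size:
--             yield items[i]
--         else:
--             yield None
-- ===== SOURCE B (Python) =====
-- def iterator_for_divmod(iterable, div: int = 3):
--     # Streaming: yield items while counting, then pad with div - count % div Nones
--     # (a full block of div Nones when count is already a multiple, like A).
--     count = 0
--     for item in iterable: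
--         yield item
--         count += 1
--     pad = div - count % div
--     for _ in range(pad):
--         yield None
-- ===== Notes on version B (the rewrite author's own statement) =====
-- stated objective: simpler
-- what changed: B streams the items with a running counter and pads in a separate phase, instead of materializing the iterable into a list and re-indexing it through a single branchy range loop.
-- outside the precondition, e.g. on iterator_for_divmod([1, 2, 3, 4, 5], -3): A returns [1, 2, 3], B returns [1, 2, 3, 4, 5]
import Mathlib
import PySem

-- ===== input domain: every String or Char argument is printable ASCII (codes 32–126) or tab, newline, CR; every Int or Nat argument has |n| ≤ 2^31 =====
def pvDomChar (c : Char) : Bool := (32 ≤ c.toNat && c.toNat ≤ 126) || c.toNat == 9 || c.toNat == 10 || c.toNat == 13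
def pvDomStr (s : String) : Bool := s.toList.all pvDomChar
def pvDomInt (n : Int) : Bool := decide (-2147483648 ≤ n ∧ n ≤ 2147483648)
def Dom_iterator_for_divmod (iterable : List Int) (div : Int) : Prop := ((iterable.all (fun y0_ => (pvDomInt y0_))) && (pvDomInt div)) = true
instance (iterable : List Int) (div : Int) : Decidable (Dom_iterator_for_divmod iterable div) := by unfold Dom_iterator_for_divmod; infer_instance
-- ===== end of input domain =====

-- B streams the items with a running counter and pads afterwards, instead of
-- materializing a list and re-indexing it through one branchy range loop (simpler, O(1) extra space).


-- ===== PORT A =====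
def iterator_for_divmod (iterable : List Int) (div : Int) : List (Option Int) :=
  let items := iterable
  let size : Int := PySem.List.len items
  let rem := PySem.Int.mod size div
  let complement := size + div - rem
  (PySem.List.pyRange 0 complement 1).foldl
    (fun acc i => if i < size then acc ++ [PySem.List.pyGet? items i] else acc ++ [none]) []

-- ===== PORT B =====
def iterator_for_divmod_alt (iterable : List Int) (div : Int) : List (Option Int) :=
  let oc := iterable.foldl
    (fun (p : List (Option Int) × Int) item => (p.1 ++ [some item], p.2 + 1)) ([], 0)
  let pad := div - PySem.Int.mod oc.2 div
  (PySem.List.pyRange 0 pad 1).foldl (fun acc _ => acc ++ [none]) oc.1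

-- ===== PRECONDITION & SPEC =====
-- Pre_ excludes div = 0, on which A raises ZeroDivisionError, and div < 0, which is outside the
-- natural domain of padding-to-a-multiple and on which A's truncation of the items is an accident
-- of its complement arithmetic.
def Pre_iterator_for_divmod (iterable : List Int) (div : Int) : Prop := 0 < div
instance (iterable : List Int) (div : Int) : Decidable (Pre_iterator_for_divmod iterable div) := by unfold Pre_iterator_for_divmod; infer_instance
def pvWitness_iterator_for_divmod : List Int × Int := ([1, 2], 3)
def Spec_iterator_for_divmod (iterable : List Int) (div : Int) (out : List (Option Int)) : Prop := out = iterator_for_divmod_alt iterable div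
instance (iterable : List Int) (div : Int) (out : List (Option Int)) : Decidable (Spec_iterator_for_divmod iterable div out) := by unfold Spec_iterator_for_divmod; infer_instance

-- ===== CLAIM (what is proved, stated in full; the proofs are below) =====
def Claim_equal_iterator_for_divmod : Prop := ∀ (iterable : List Int) (div : Int), Dom_iterator_for_divmod iterable div → Pre_iterator_for_divmod iterable div → Spec_iterator_for_divmod iterable div (iterator_for_divmod iterable div)

-- ===== LEMMAS AND PROOFS =====

-- B's counting loop just maps `some` over the items and counts them.
lemma alt_count_loop (xs : List Int) (acc : List (Option Int)) (c : Int) :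
    xs.foldl (fun (p : List (Option Int) × Int) item => (p.1 ++ [some item], p.2 + 1)) (acc, c)
      = (acc ++ xs.map some, c + xs.length) := by
  induction xs generalizing acc c with
  | nil => simp
  | cons x xs ih => simp [List.foldl_cons, ih]; omega

-- Appending `none` once per loop iteration appends `length`-many `none`s.
lemma foldl_append_none {α : Type} (l : List α) (acc : List (Option Int)) :
    l.foldl (fun acc _ => acc ++ [(none : Option Int)]) acc
      = acc ++ List.replicate l.length none := by
  induction l generalizing acc with
  | nil => simp
  | cons x xs ih => simp [List.foldl_cons, ih, List.replicate_succ]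

lemma canonical_A (iterable : List Int) (div : Int) (hd : 0 < div) :
    iterator_for_divmod iterable div
      = iterable.map some
        ++ List.replicate (div - PySem.Int.mod (iterable.length : Int) div).toNat none := by
  unfold iterator_for_divmod
  dsimp only
  have hrem0 : 0 ≤ PySem.Int.mod (PySem.List.len iterable) div := PySem.Int.mod_nonneg _ hd
  have hremlt : PySem.Int.mod (PySem.List.len iterable) div < div := PySem.Int.mod_lt _ hd
  have hsize : (0:Int) ≤ PySem.List.len iterable := by
    simp [PySem.List.len_eq]
  -- split the range at size
  rw [PySem.List.pyRange_one_append 0 (PySem.List.len iterable)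
        (PySem.List.len iterable + div - PySem.Int.mod (PySem.List.len iterable) div)
        hsize (by omega), List.foldl_append]
  -- first half: every i has 0 ≤ i < size
  have h1 : (PySem.List.pyRange 0 (PySem.List.len iterable) 1).foldl
      (fun acc i => if i < PySem.List.len iterable then acc ++ [PySem.List.pyGet? iterable i] else acc ++ [none]) []
      = iterable.map some := by
    have hcongr := PySem.List.foldl_congr_mem
      (l := PySem.List.pyRange 0 (PySem.List.len iterable) 1)
      (f := fun acc i => if i < PySem.List.len iterable then acc ++ [PySem.List.pyGet? iterable i] else acc ++ [none])
      (g := fun acc i => acc ++ [PySem.List.pyGet? iterable i]) (init := [])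
      (by intro acc x hx
          rcases (PySem.List.mem_pyRange_one).1 hx with ⟨h0, h1⟩
          dsimp only
          rw [if_pos h1])
    rw [hcongr, PySem.List.foldl_append_singleton_eq_map]
    simp only [List.nil_append]
    rw [PySem.List.pyRange_one]
    rw [List.map_map]
    refine List.ext_getElem (by simp [PySem.List.len_eq]) ?_
    intro k hk1 hk2
    simp only [List.getElem_map, List.getElem_range, Function.comp]
    have hk : k < iterable.length := by simpa [PySem.List.len_eq] using hk2
    rw [show (0:Int) + (k:Int) = (k:Int) by ring]
    simp [PySem.List.pyGet?_natCast, List.getElem?_eq_getElem hk]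
  -- second half: every i has size ≤ i
  have h2 : ∀ init, (PySem.List.pyRange (PySem.List.len iterable)
      (PySem.List.len iterable + div - PySem.Int.mod (PySem.List.len iterable) div) 1).foldl
      (fun acc i => if i < PySem.List.len iterable then acc ++ [PySem.List.pyGet? iterable i] else acc ++ [none]) init
      = init ++ List.replicate (div - PySem.Int.mod (iterable.length : Int) div).toNat none := by
    intro init
    have hcongr := PySem.List.foldl_congr_mem
      (l := PySem.List.pyRange (PySem.List.len iterable)
        (PySem.List.len iterable + div - PySem.Int.mod (PySem.List.len iterable) div) 1)
      (f := fun acc i => if i < PySem.List.len iterable then acc ++ [PySem.List.pyGet? iterable i] else acc ++ [none])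
      (g := fun acc _ => acc ++ [(none : Option Int)]) (init := init)
      (by intro acc x hx
          rcases (PySem.List.mem_pyRange_one).1 hx with ⟨h0, h1⟩
          have : ¬ x < PySem.List.len iterable := by omega
          dsimp only
          rw [if_neg this])
    rw [hcongr, foldl_append_none]
    congr 1
    rw [PySem.List.length_pyRange_one]
    congr 1
    simp [PySem.List.len_eq]
    omega
  rw [h1, h2]

lemma canonical_B (iterable : List Int) (div : Int) :
    iterator_for_divmod_alt iterable div
      = iterable.map some
        ++ List.replicate (div - PySem.Int.mod (iterable.length : Int) div).toNat none := by
  unfold iterator_for_divmod_alt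
  rw [alt_count_loop]
  simp only [List.nil_append, Int.zero_add]
  rw [PySem.List.pyRange_one]
  rw [foldl_append_none]
  simp

-- ===== VERDICT (by name: the statement is the Claim_ definition above) =====
theorem iterator_for_divmod_spec : Claim_equal_iterator_for_divmod := by
  intro iterable div _hdom hpre
  unfold Spec_iterator_for_divmod
  rw [canonical_A iterable div hpre, canonical_B iterable div]
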